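-- pv_equiv track=rewrite | github.com/joniledantes/wsfephpok-integrado | fusionador_modulos_fusionado.py | genera_comandos_fusion
-- ===== SOURCE A (Python) =====
-- MODERN_KEYWORDS = ['FINAL', 'v2', '2104', 'sept24', '3.php', '4.php']
--
-- def escoge_moderno(paths):
--     for kw in MODERN_KEYWORDS:
--         for p in paths:
--             if kw.lower() in p.lower():
--                 return p
--     return sorted(paths, key=len)[0]
--
-- def genera_comandos_fusion(by_name):
--     result = []
--     for base, paths in by_name.items():
--         if len(paths) > 1:
--             moderno = escoge_moderno(paths)
--             result.append(f"# {base} está duplicado en:")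
--             for p in paths:
--                 if p == moderno:
--                     result.append(f"#   [ELEGIDO] {p}")
--                 else:
--                     result.append(f"#   {p}")
--             result.append(f"# Sugerencia: CONSERVA '{moderno}' y revisa/integra manualmente el resto en esta versión.\n")
--             for p in paths:
--                 if p != moderno:
--                     result.append(f"# Elimina: {p}")
--             result.append("# ----\n")
--         else:
--             result.append(f"# {base} único en {paths[0]}\n")
--     return "\n".join(result)
-- ===== SOURCE B (Python) =====
-- MODERN_KEYWORDS = ['FINAL', 'v2', '2104', 'sept24', '3.php', '4.php']
--
-- def _rank(p):
--     low = p.lower()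
--     for i, kw in enumerate(MODERN_KEYWORDS):
--         if kw.lower() in low:
--             return i
--     return len(MODERN_KEYWORDS)
--
-- def escoge_moderno(paths):
--     # single min over a combined key: keyword priority, then (fallback only) length,
--     # with min's first-occurrence rule supplying the positional tie-break
--     def key(p):
--         r = _rank(p)
--         return (r, len(p) if r == len(MODERN_KEYWORDS) else 0)
--     return min(paths, key=key)
--
-- def _bloque(base, paths):
--     if len(paths) <= 1:
--         return [f"# {base} único en {paths[0]}\n"]
--     m = escoge_moderno(paths)
--     return ([f"# {base} está duplicado en:"]
--             + [f"#   [ELEGIDO] {p}" if p == m else f"#   {p}" for p in paths]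
--             + [f"# Sugerencia: CONSERVA '{m}' y revisa/integra manualmente el resto en esta versión.\n"]
--             + [f"# Elimina: {p}" for p in paths if p != m]
--             + ["# ----\n"])
--
-- def genera_comandos_fusion(by_name):
--     return "\n".join(line for base, paths in by_name.items() for line in _bloque(base, paths))
-- ===== Notes on version B (the rewrite author's own statement) =====
-- stated objective: alternative
-- what changed: escoge_moderno's nested keyword-by-path scans plus a stable sort fallback are replaced by one min over a combined (keyword-rank, fallback-length) key, and the report is built as a flat concatenation of per-group blocks instead of one mutating accumulator loop.
import Mathlib
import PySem

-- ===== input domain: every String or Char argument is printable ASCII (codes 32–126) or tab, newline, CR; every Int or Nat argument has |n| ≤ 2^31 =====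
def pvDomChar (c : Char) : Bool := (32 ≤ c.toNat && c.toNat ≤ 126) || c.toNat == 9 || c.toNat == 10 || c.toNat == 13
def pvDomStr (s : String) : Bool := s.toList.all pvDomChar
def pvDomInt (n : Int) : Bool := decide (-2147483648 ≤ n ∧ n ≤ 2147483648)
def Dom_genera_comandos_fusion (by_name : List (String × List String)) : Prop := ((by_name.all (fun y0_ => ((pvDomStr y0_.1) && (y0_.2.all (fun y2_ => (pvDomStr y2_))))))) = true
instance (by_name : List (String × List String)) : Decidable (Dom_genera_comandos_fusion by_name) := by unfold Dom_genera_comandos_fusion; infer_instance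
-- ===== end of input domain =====

-- B replaces A's nested keyword/path scans and stable sort by a single min over a combined
-- (keyword-rank, fallback-length) key, and builds the report by flatMap of per-group blocks
-- instead of one mutating accumulator loop (objective: alternative decomposition, not speed).

-- ===== PORT A =====
def MODERN_KEYWORDS : List String := ["FINAL", "v2", "2104", "sept24", "3.php", "4.php"]

def escoge_moderno (paths : List String) : String :=
  match MODERN_KEYWORDS.findSome?
      (fun kw => paths.find? (fun p => PySem.Str.isIn (PySem.Str.lower kw) (PySem.Str.lower p))) with
  | some p => p
  | none => PySem.List.pyGetD (PySem.List.sorted paths (fun p => PySem.Str.len p)) 0 ""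

def genera_comandos_fusion (by_name : List (String × List String)) : String :=
  PySem.Str.join "\n" (by_name.foldl (fun result bp =>
    let base := bp.1
    let paths := bp.2
    if paths.length > 1 then
      let moderno := escoge_moderno paths
      let r1 := result ++ ["# " ++ base ++ " está duplicado en:"]
      let r2 := paths.foldl (fun r p =>
        if p == moderno then r ++ ["#   [ELEGIDO] " ++ p] else r ++ ["#   " ++ p]) r1
      let r3 := r2 ++ ["# Sugerencia: CONSERVA '" ++ moderno ++ "' y revisa/integra manualmente el resto en esta versión.\n"]
      let r4 := paths.foldl (fun r p =>
        if p != moderno then r ++ ["# Elimina: " ++ p] else r) r3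
      r4 ++ ["# ----\n"]
    else
      result ++ ["# " ++ base ++ " único en " ++ PySem.List.pyGetD paths 0 "" ++ "\n"]) [])

-- ===== PORT B =====
-- _rank: index of the first modern keyword contained in the lowered path, else len(MODERN_KEYWORDS)
def rankFrom (low : String) : List String → Nat
  | [] => 0
  | kw :: rest => if PySem.Str.isIn (PySem.Str.lower kw) low then 0 else 1 + rankFrom low rest

def rank_alt (p : String) : Nat := rankFrom (PySem.Str.lower p) MODERN_KEYWORDS

def escoge_moderno_alt (paths : List String) : String :=
  (PySem.List.min2? paths (fun p => rank_alt p)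
    (fun p => if rank_alt p == MODERN_KEYWORDS.length then PySem.Str.len p else 0)).getD ""

def bloque_alt (base : String) (paths : List String) : List String :=
  if paths.length ≤ 1 then
    ["# " ++ base ++ " único en " ++ PySem.List.pyGetD paths 0 "" ++ "\n"]
  else
    let m := escoge_moderno_alt paths
    ["# " ++ base ++ " está duplicado en:"]
    ++ paths.map (fun p => if p == m then "#   [ELEGIDO] " ++ p else "#   " ++ p)
    ++ ["# Sugerencia: CONSERVA '" ++ m ++ "' y revisa/integra manualmente el resto en esta versión.\n"]
    ++ (paths.filter (fun p => p != m)).map (fun p => "# Elimina: " ++ p)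
    ++ ["# ----\n"]

def genera_comandos_fusion_alt (by_name : List (String × List String)) : String :=
  PySem.Str.join "\n" (by_name.flatMap (fun bp => bloque_alt bp.1 bp.2))

-- ===== PRECONDITION & SPEC =====
-- Pre_ excludes inputs where some group carries no path at all: there A raises
-- IndexError on paths[0] (and B raises the same way at the same place).
def Pre_genera_comandos_fusion (by_name : List (String × List String)) : Prop :=
  ∀ bp ∈ by_name, bp.2 ≠ []
instance (by_name : List (String × List String)) : Decidable (Pre_genera_comandos_fusion by_name) := by
  unfold Pre_genera_comandos_fusion; infer_instance

def pvWitness_genera_comandos_fusion : (List (String × List String)) :=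
  [("util", ["a/old/util.php", "b/util_v2.php", "c/u.php"]), ("index", ["src/index.php"])]

def Spec_genera_comandos_fusion (by_name : List (String × List String)) (out : String) : Prop := out = genera_comandos_fusion_alt by_name
instance (by_name : List (String × List String)) (out : String) : Decidable (Spec_genera_comandos_fusion by_name out) := by unfold Spec_genera_comandos_fusion; infer_instance

-- ===== CLAIM (what is proved, stated in full; the proofs are below) =====
def Claim_equal_genera_comandos_fusion : Prop := ∀ (by_name : List (String × List String)), Dom_genera_comandos_fusion by_name → Pre_genera_comandos_fusion by_name → Spec_genera_comandos_fusion by_name (genera_comandos_fusion by_name)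

-- ===== LEMMAS AND PROOFS =====

def min2step {α : Type} (k1 : α → Nat) (k2 : α → Int) (acc : Option α) (x : α) : Option α :=
  match acc with
  | none => some x
  | some m => if (decide (k1 x < k1 m) || !decide (k1 m < k1 x) && decide (k2 x < k2 m)) = true then some x else some m

theorem min2?_eq_foldl {α : Type} (k1 : α → Nat) (k2 : α → Int) (xs : List α) :
    PySem.List.min2? xs k1 k2 = xs.foldl (min2step k1 k2) none := rfl

theorem min2step_some {α : Type} (k1 : α → Nat) (k2 : α → Int) (m x : α) :
    min2step k1 k2 (some m) x = if (decide (k1 x < k1 m) || !decide (k1 m < k1 x) && decide (k2 x < k2 m)) = true then some x else some m := rfl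

theorem min2_step_stay {α : Type} (k1 : α → Nat) (k2 : α → Int) (m : α) (suf : List α)
    (hsuf : ∀ y ∈ suf, k1 m < k1 y ∨ (k1 m = k1 y ∧ k2 m ≤ k2 y)) :
    suf.foldl (min2step k1 k2) (some m) = some m := by
  induction suf with
  | nil => rfl
  | cons y l ih =>
    have hy := hsuf y (by simp)
    have hcond : (decide (k1 y < k1 m) || !decide (k1 m < k1 y) && decide (k2 y < k2 m)) = false := by
      rcases hy with h | ⟨h1, h2⟩ <;> (simp_all; try omega)
    simp only [List.foldl_cons, min2step_some, hcond]
    exact ih (fun y hy => hsuf y (by simp [hy]))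

theorem min2_foldl_mem {α : Type} (k1 : α → Nat) (k2 : α → Int) (l : List α) (a : α) :
    ∃ c, l.foldl (min2step k1 k2) (some a) = some c ∧ (c = a ∨ c ∈ l) := by
  induction l generalizing a with
  | nil => exact ⟨a, rfl, Or.inl rfl⟩
  | cons y l ih =>
    simp only [List.foldl_cons, min2step_some]
    by_cases h : (decide (k1 y < k1 a) || !decide (k1 a < k1 y) && decide (k2 y < k2 a)) = true
    · simp only [h, if_true]
      obtain ⟨c, hc, hm⟩ := ih y
      exact ⟨c, hc, by rcases hm with h | h <;> simp [h]⟩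
    · simp only [h]
      obtain ⟨c, hc, hm⟩ := ih a
      exact ⟨c, hc, by rcases hm with h | h <;> simp [h]⟩

theorem min2?_eq_of_split {α : Type} (k1 : α → Nat) (k2 : α → Int) (pre suf : List α) (m : α)
    (hpre : ∀ y ∈ pre, k1 m < k1 y ∨ (k1 m = k1 y ∧ k2 m < k2 y))
    (hsuf : ∀ y ∈ suf, k1 m < k1 y ∨ (k1 m = k1 y ∧ k2 m ≤ k2 y)) :
    PySem.List.min2? (pre ++ m :: suf) k1 k2 = some m := by
  rw [min2?_eq_foldl, List.foldl_append]
  cases hp : pre with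
  | nil =>
    simp only [List.foldl_nil, List.foldl_cons]
    exact min2_step_stay k1 k2 m suf hsuf
  | cons y l =>
    obtain ⟨c, hc, hm⟩ := min2_foldl_mem k1 k2 l y
    have hcpre : c ∈ pre := by rcases hm with h | h <;> simp [hp, h]
    have hcond : (decide (k1 m < k1 c) || !decide (k1 c < k1 m) && decide (k2 m < k2 c)) = true := by
      rcases hpre c hcpre with h | ⟨h1, h2⟩ <;> (simp_all; try omega)
    simp only [List.foldl_cons]
    rw [show min2step k1 k2 none y = some y from rfl, hc]
    rw [show min2step k1 k2 (some c) m = some m from by rw [min2step_some, hcond]; rfl]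
    exact min2_step_stay k1 k2 m suf hsuf

def min1step {α : Type} (key : α → Int) (acc : Option α) (x : α) : Option α :=
  match acc with
  | none => some x
  | some m => if key x < key m then some x else some m

theorem min?_eq_foldl {α : Type} (key : α → Int) (xs : List α) :
    PySem.List.min? xs key = xs.foldl (min1step key) none := rfl

theorem min1_foldl_some {α : Type} (key : α → Int) (l : List α) (a m : α)
    (h : l.foldl (min1step key) (some a) = some m) :
    (m = a ∧ ∀ y ∈ l, key a ≤ key y) ∨
    (∃ pre suf, l = pre ++ m :: suf ∧ key m < key a ∧ (∀ y ∈ pre, key m < key y) ∧ (∀ y ∈ suf, key m ≤ key y)) := by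
  induction l generalizing a with
  | nil => left; simp_all
  | cons y l ih =>
    simp only [List.foldl_cons, min1step] at h
    by_cases hy : key y < key a
    · rw [if_pos hy] at h
      rcases ih y h with ⟨rfl, hall⟩ | ⟨pre, suf, rfl, h1, h2, h3⟩
      · right
        exact ⟨[], l, rfl, hy, by simp, hall⟩
      · right
        refine ⟨y :: pre, suf, rfl, lt_trans h1 hy, ?_, h3⟩
        intro z hz
        rcases List.mem_cons.mp hz with rfl | hz'
        · exact h1
        · exact h2 z hz' 
    · rw [if_neg hy] at h
      rcases ih a h with ⟨rfl, hall⟩ | ⟨pre, suf, rfl, h1, h2, h3⟩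
      · left
        refine ⟨rfl, ?_⟩
        intro z hz
        rcases List.mem_cons.mp hz with rfl | hz
        · omega
        · exact hall z hz
      · right
        refine ⟨y :: pre, suf, rfl, h1, ?_, h3⟩
        intro z hz
        rcases List.mem_cons.mp hz with rfl | hz
        · omega
        · exact h2 z hz

theorem min?_split {α : Type} (key : α → Int) (xs : List α) (m : α)
    (h : PySem.List.min? xs key = some m) :
    ∃ pre suf, xs = pre ++ m :: suf ∧ (∀ y ∈ pre, key m < key y) ∧ (∀ y ∈ suf, key m ≤ key y) := by
  rw [min?_eq_foldl] at h
  cases xs with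
  | nil => simp at h
  | cons x l =>
    simp only [List.foldl_cons] at h
    rw [show min1step key none x = some x from rfl] at h
    rcases min1_foldl_some key l x m h with ⟨rfl, hall⟩ | ⟨pre, suf, rfl, h1, h2, h3⟩
    · exact ⟨[], l, rfl, by simp, hall⟩
    · refine ⟨x :: pre, suf, rfl, ?_, h3⟩
      intro z hz
      rcases List.mem_cons.mp hz with rfl | hz
      · exact h1
      · exact h2 z hz

theorem head?_sorted_eq_min? {α : Type} (key : α → Int) (xs : List α) :
    (PySem.List.sorted xs key).head? = PySem.List.min? xs key := by
  induction xs using List.reverseRecOn with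
  | nil => rfl
  | append_singleton l x ih =>
    rw [PySem.List.sorted_eq_foldl_insertBy, List.foldl_append, min?_eq_foldl, List.foldl_append,
        ← PySem.List.sorted_eq_foldl_insertBy, ← min?_eq_foldl]
    simp only [List.foldl_cons, List.foldl_nil]
    cases hs : PySem.List.sorted l key with
    | nil =>
      have : l = [] := by rw [← PySem.List.sorted_eq_nil_iff (key := key)]; exact hs
      subst this
      rfl
    | cons h t =>
      have hmin : PySem.List.min? l key = some h := by rw [← ih, hs]; rfl
      rw [hmin]
      rw [show PySem.List.insertBy (fun a b => decide (key a < key b)) x (h :: t)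
            = if decide (key x < key h) = true then x :: h :: t else h :: PySem.List.insertBy (fun a b => decide (key a < key b)) x t from rfl]
      rw [show min1step key (some h) x = if key x < key h then some x else some h from rfl]
      by_cases hxh : key x < key h
      · simp [hxh]
      · simp [hxh]


-- rank facts
theorem rankFrom_cons (low kw : String) (rest : List String) :
    rankFrom low (kw :: rest)
      = if PySem.Str.isIn (PySem.Str.lower kw) low then 0 else 1 + rankFrom low rest := rfl

theorem rankFrom_eq_length (low : String) (kws : List String)
    (h : ∀ kw ∈ kws, ¬ PySem.Str.isIn (PySem.Str.lower kw) low = true) :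
    rankFrom low kws = kws.length := by
  induction kws with
  | nil => rfl
  | cons kw rest ih =>
    rw [rankFrom_cons, if_neg (h kw (by simp))]
    rw [ih (fun k hk => h k (by simp [hk]))]
    simp [Nat.add_comm]

-- A's keyword search returns the first path of minimal rank, and that rank is < |kws|
theorem search_char (kws : List String) (paths : List String) (m : String)
    (h : kws.findSome? (fun kw => paths.find? (fun p => PySem.Str.isIn (PySem.Str.lower kw) (PySem.Str.lower p))) = some m) :
    ∃ pre suf, paths = pre ++ m :: suf
      ∧ (∀ y ∈ pre, rankFrom (PySem.Str.lower m) kws < rankFrom (PySem.Str.lower y) kws)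
      ∧ (∀ y ∈ paths, rankFrom (PySem.Str.lower m) kws ≤ rankFrom (PySem.Str.lower y) kws)
      ∧ rankFrom (PySem.Str.lower m) kws < kws.length := by
  induction kws with
  | nil => simp at h
  | cons kw rest ih =>
    rw [List.findSome?_cons] at h
    cases hf : paths.find? (fun p => PySem.Str.isIn (PySem.Str.lower kw) (PySem.Str.lower p)) with
    | some m' =>
      rw [hf] at h
      have hm : m' = m := by simpa using h
      subst hm
      obtain ⟨hkm0, pre, suf, hsplit, hpre0⟩ := List.find?_eq_some_iff_append.mp hf
      have hkm : PySem.Str.isIn (PySem.Str.lower kw) (PySem.Str.lower m') = true := by simpa using hkm0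
      have hpre : ∀ y ∈ pre, PySem.Str.isIn (PySem.Str.lower kw) (PySem.Str.lower y) = false := by
        intro y hy
        simpa using hpre0 y hy
      refine ⟨pre, suf, hsplit, ?_, ?_, ?_⟩
      · intro y hy
        rw [rankFrom_cons, if_pos hkm, rankFrom_cons, if_neg (by simp only [hpre y hy]; decide)]
        omega
      · intro y _
        rw [rankFrom_cons, if_pos hkm]
        omega
      · rw [rankFrom_cons, if_pos hkm]
        simp
    | none =>
      rw [hf] at h
      have hnone : ∀ p ∈ paths, ¬ PySem.Str.isIn (PySem.Str.lower kw) (PySem.Str.lower p) = true := by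
        intro p hp
        simpa using List.find?_eq_none.mp hf p hp
      obtain ⟨pre, suf, hsplit, hpre, hall, hlen⟩ := ih h
      have hmem : m ∈ paths := by rw [hsplit]; simp
      have hshift : ∀ p ∈ paths,
          rankFrom (PySem.Str.lower p) (kw :: rest) = 1 + rankFrom (PySem.Str.lower p) rest := by
        intro p hp
        rw [rankFrom_cons, if_neg (hnone p hp)]
      refine ⟨pre, suf, hsplit, ?_, ?_, ?_⟩
      · intro y hy
        have hymem : y ∈ paths := by rw [hsplit]; exact List.mem_append.mpr (Or.inl hy)
        rw [hshift m hmem, hshift y hymem]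
        exact Nat.add_lt_add_left (hpre y hy) 1
      · intro y hy
        rw [hshift m hmem, hshift y hy]
        exact Nat.add_le_add_left (hall y hy) 1
      · rw [hshift m hmem]
        simpa [Nat.add_comm] using Nat.add_lt_add_left hlen 1

set_option maxHeartbeats 1000000 in
theorem escoge_eq (paths : List String) (hne : paths ≠ []) :
    escoge_moderno paths = escoge_moderno_alt paths := by
  unfold escoge_moderno escoge_moderno_alt
  cases hs : MODERN_KEYWORDS.findSome?
      (fun kw => paths.find? (fun p => PySem.Str.isIn (PySem.Str.lower kw) (PySem.Str.lower p))) with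
  | some m =>
    obtain ⟨pre, suf, hsplit, hpre, hall, hlen⟩ := search_char MODERN_KEYWORDS paths m hs
    have hk6 : MODERN_KEYWORDS.length = 6 := rfl
    have hlt6 : rank_alt m < 6 := by rw [rank_alt]; rw [hk6] at hlen; exact hlen
    have hb : (rank_alt m == MODERN_KEYWORDS.length) = false := by
      rw [hk6, beq_eq_false_iff_ne]; omega
    have hmin : PySem.List.min2? paths (fun p => rank_alt p)
        (fun p => if rank_alt p == MODERN_KEYWORDS.length then PySem.Str.len p else 0) = some m := by
      rw [hsplit]
      apply min2?_eq_of_split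
      · intro y hy
        exact Or.inl (hpre y hy)
      · intro y hy
        have hymem : y ∈ paths := by rw [hsplit]; simp [hy]
        rcases Nat.lt_or_ge (rank_alt m) (rank_alt y) with hlt | hge
        · exact Or.inl hlt
        · have heq : rank_alt m = rank_alt y := le_antisymm (hall y hymem) hge
          refine Or.inr ⟨heq, ?_⟩
          have hby : (rank_alt y == MODERN_KEYWORDS.length) = false := by rw [← heq]; exact hb
          simp only [hb, hby]
          simp
    rw [hmin]
    rfl
  | none =>
    have hnone : ∀ kw ∈ MODERN_KEYWORDS, paths.find?
        (fun p => PySem.Str.isIn (PySem.Str.lower kw) (PySem.Str.lower p)) = none := by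
      intro kw hkw
      exact List.findSome?_eq_none_iff.mp hs kw hkw
    have hrank6 : ∀ p ∈ paths, rank_alt p = 6 := by
      intro p hp
      rw [rank_alt]
      apply rankFrom_eq_length
      intro kw hkw
      exact List.find?_eq_none.mp (hnone kw hkw) p hp
    cases hm : PySem.List.min? paths (fun p => PySem.Str.len p) with
    | none =>
      refine absurd ?_ hne
      rw [← PySem.List.min?_eq_none_iff (key := fun p => PySem.Str.len p)]
      exact hm
    | some m0 =>
      obtain ⟨pre, suf, hsplit, hpre, hsuf⟩ := min?_split (fun p => PySem.Str.len p) paths m0 hm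
      have hm0mem : m0 ∈ paths := by rw [hsplit]; simp
      have hk2 : ∀ p ∈ paths, (if rank_alt p == MODERN_KEYWORDS.length then PySem.Str.len p else 0)
          = PySem.Str.len p := by
        intro p hp
        rw [hrank6 p hp]
        rfl
      have hmin : PySem.List.min2? paths (fun p => rank_alt p)
          (fun p => if rank_alt p == MODERN_KEYWORDS.length then PySem.Str.len p else 0) = some m0 := by
        rw [hsplit]
        apply min2?_eq_of_split
        · intro y hy
          have hymem : y ∈ paths := by rw [hsplit]; simp [hy]
          refine Or.inr ⟨by rw [hrank6 m0 hm0mem, hrank6 y hymem], ?_⟩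
          rw [hk2 m0 hm0mem, hk2 y hymem]
          exact hpre y hy
        · intro y hy
          have hymem : y ∈ paths := by rw [hsplit]; simp [hy]
          refine Or.inr ⟨by rw [hrank6 m0 hm0mem, hrank6 y hymem], ?_⟩
          rw [hk2 m0 hm0mem, hk2 y hymem]
          exact hsuf y hy
      rw [hmin]
      have hhead : (PySem.List.sorted paths (fun p => PySem.Str.len p)).head? = some m0 := by
        rw [head?_sorted_eq_min?, hm]
      cases hsort : PySem.List.sorted paths (fun p => PySem.Str.len p) with
      | nil => rw [hsort] at hhead; simp at hhead
      | cons h0 t =>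
        rw [hsort] at hhead
        have : h0 = m0 := by simpa using hhead
        subst this
        simp [PySem.List.pyGetD_zero]


theorem bloque_eq (result : List String) (base : String) (paths : List String) (hne : paths ≠ []) :
    (if paths.length > 1 then
      let moderno := escoge_moderno paths
      let r1 := result ++ ["# " ++ base ++ " está duplicado en:"]
      let r2 := paths.foldl (fun r p =>
        if p == moderno then r ++ ["#   [ELEGIDO] " ++ p] else r ++ ["#   " ++ p]) r1
      let r3 := r2 ++ ["# Sugerencia: CONSERVA '" ++ moderno ++ "' y revisa/integra manualmente el resto en esta versión.\n"]
      let r4 := paths.foldl (fun r p =>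
        if p != moderno then r ++ ["# Elimina: " ++ p] else r) r3
      r4 ++ ["# ----\n"]
    else
      result ++ ["# " ++ base ++ " único en " ++ PySem.List.pyGetD paths 0 "" ++ "\n"])
    = result ++ bloque_alt base paths := by
  by_cases hlen : paths.length > 1
  · rw [if_pos hlen]
    have hm := escoge_eq paths hne
    unfold bloque_alt
    rw [if_neg (by omega)]
    simp only [← hm]
    have h1 : paths.foldl (fun r p =>
        if p == escoge_moderno paths then r ++ ["#   [ELEGIDO] " ++ p] else r ++ ["#   " ++ p])
        (result ++ ["# " ++ base ++ " está duplicado en:"])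
        = (result ++ ["# " ++ base ++ " está duplicado en:"])
          ++ paths.map (fun p => if p == escoge_moderno paths then "#   [ELEGIDO] " ++ p else "#   " ++ p) := by
      rw [PySem.List.foldl_congr_mem paths _
        (fun r p => r ++ [if p == escoge_moderno paths then "#   [ELEGIDO] " ++ p else "#   " ++ p]) _
        (by intro acc x _; by_cases hc : (x == escoge_moderno paths) = true <;> simp [hc])]
      exact PySem.List.foldl_append_singleton_eq_map _ _ _
    rw [h1, PySem.List.foldl_append_if (fun p => p != escoge_moderno paths) (fun p => "# Elimina: " ++ p)]
    simp [List.append_assoc]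
  · rw [if_neg hlen]
    unfold bloque_alt
    rw [if_pos (by omega)]

-- ===== VERDICT (by name: the statement is the Claim_ definition above) =====
theorem genera_comandos_fusion_spec : Claim_equal_genera_comandos_fusion := by
  intro by_name _ hpre
  unfold Spec_genera_comandos_fusion genera_comandos_fusion genera_comandos_fusion_alt
  congr 1
  rw [PySem.List.foldl_congr_mem by_name _ (fun acc bp => acc ++ bloque_alt bp.1 bp.2) []
    (by intro acc bp hbp; exact bloque_eq acc bp.1 bp.2 (hpre bp hbp))]
  simpa using PySem.List.foldl_append_eq_flatMap (fun bp => bloque_alt bp.1 bp.2) by_name []
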